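-- pv_equiv track=rewrite | github.com/m-e-meyer/av-snapshot | BACKEND/av-snapshot.py | score_familiars
-- ===== SOURCE A (Python) =====
-- def getbits(byts, index, eltsize):
-- 	"""TODO"""
-- 	loc = index * eltsize
-- 	bytloc = loc >> 3
-- 	bytoffs = loc % 8
-- 	mask = (1 << eltsize) - 1
-- 	if (bytoffs+eltsize) > 8:
-- 		bb = byts[bytloc]*256+byts[bytloc+1]
-- 		return (bb >> (16-bytoffs-eltsize)) & mask
-- 	return (byts[bytloc] >> (8-bytoffs-eltsize)) & mask
--
-- def score_familiars(state):
-- 	have, lack, tour, hundred = (0, 0, 0, 0)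
-- 	familiars = state['familiars']
-- 	familiar_bytes = state['familiar-bytes']
-- 	for i in range(len(familiars)):
-- 		x = getbits(familiar_bytes, i+1, 4)
-- 		if x in (1, 3, 4):
-- 			have = have + 1
-- 		else:
-- 			lack = lack + 1
-- 		if x >= 3:
-- 			tour = tour + 1
-- 			if x in (3, 5, 6):
-- 				hundred = hundred + 1
-- 	lack = lack - 9		# we won't count the April Foolmiliars
-- 	state['score_fams'] = have
-- 	return (have, lack, tour, hundred)
-- ===== SOURCE B (Python) =====
-- def score_familiars(state):
--     familiars = state['familiars']
--     byts = state['familiar-bytes']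
--     n = len(familiars)
--     nibs = []
--     for b in byts[: n // 2 + 1]:
--         nibs.append((b >> 4) & 15)
--         nibs.append(b & 15)
--     freq = [0] * 16
--     for x in nibs[1 : n + 1]:
--         freq[x] += 1
--     have = freq[1] + freq[3] + freq[4]
--     tour = sum(freq[c] for c in range(3, 16))
--     hundred = freq[3] + freq[5] + freq[6]
--     lack = n - have - 9
--     state['score_fams'] = have
--     return (have, lack, tour, hundred)
-- ===== Notes on version B (the rewrite author's own statement) =====
-- stated objective: alternative
-- what changed: Replaces A's per-familiar getbits extraction with a fused four-counter loop by a per-byte pass that unpacks each byte into two nibbles, slices off the unused nibbles, tallies them into a 16-entry frequency table, and derives have/tour/hundred from the table by arithmetic, with lack computed in closed form as len(familiars) - have - 9.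
-- outside the precondition, e.g. on score_familiars({'familiars': [1, 2, 3], 'familiar-bytes': []}): A raises IndexError, B returns (0, -6, 0, 0); on score_familiars({'familiars': [1]}): A raises KeyError, B raises KeyError
import Mathlib
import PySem

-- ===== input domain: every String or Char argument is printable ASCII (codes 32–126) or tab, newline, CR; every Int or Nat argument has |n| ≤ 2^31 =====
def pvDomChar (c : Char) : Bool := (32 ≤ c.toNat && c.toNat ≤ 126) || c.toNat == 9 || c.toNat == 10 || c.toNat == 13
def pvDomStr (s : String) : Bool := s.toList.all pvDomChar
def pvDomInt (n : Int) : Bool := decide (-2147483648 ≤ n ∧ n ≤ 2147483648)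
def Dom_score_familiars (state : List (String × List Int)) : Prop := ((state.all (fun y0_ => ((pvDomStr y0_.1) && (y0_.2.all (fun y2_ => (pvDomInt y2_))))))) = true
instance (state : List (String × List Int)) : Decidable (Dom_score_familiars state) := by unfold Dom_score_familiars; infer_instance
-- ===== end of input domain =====

-- B replaces A's per-familiar getbits loop with four fused counters by a per-byte pass that
-- unpacks each byte into two nibbles, slices off the unused nibbles, tallies them into a
-- 16-entry frequency table and derives have/tour/hundred from the table by arithmetic,
-- with lack in closed form as n - have - 9 (objective: alternative; same O(n) cost).
-- Both A and B also mutate state['score_fams']; the equivalence proved here is about the return value.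

-- ===== PORT A =====
-- Python list indexing byts[bytloc] raises IndexError when out of range; Pre_ guarantees the index
-- is in range, so the `.getD 0` default is never used inside Pre_.
def getbits (byts : List Int) (index : Int) (eltsize : Int) : Int :=
  let loc := index * eltsize
  let bytloc := loc >>> (3 : Nat)
  let bytoffs := PySem.Int.mod loc 8
  let mask := (1 <<< eltsize.toNat) - 1
  -- shift counts below are nonnegative whenever the corresponding branch is reached with
  -- eltsize = 4 (the only call site); `.toNat` is exact there (Python raises on a negative shift)
  if bytoffs + eltsize > 8 then
    let bb := (PySem.List.pyGet? byts bytloc).getD 0 * 256 + (PySem.List.pyGet? byts (bytloc + 1)).getD 0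
    PySem.Int.band (bb >>> (16 - bytoffs - eltsize).toNat) mask
  else
    PySem.Int.band ((PySem.List.pyGet? byts bytloc).getD 0 >>> (8 - bytoffs - eltsize).toNat) mask

-- state['familiars'] / state['familiar-bytes'] raise KeyError when missing; Pre_ requires both
-- keys present, so the `.getD []` defaults are never used inside Pre_.
def score_familiars (state : List (String × List Int)) : Int × Int × Int × Int :=
  let familiars := ((PySem.Dict.mk state).get? "familiars").getD []
  let familiar_bytes := ((PySem.Dict.mk state).get? "familiar-bytes").getD []
  let r := (PySem.List.pyRange 0 (familiars.length : Int) 1).foldl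
    (fun (acc : Int × Int × Int × Int) i =>
      let x := getbits familiar_bytes (i + 1) 4
      let hv := acc.1
      let lk := acc.2.1
      let tr := acc.2.2.1
      let hd := acc.2.2.2
      let (hv, lk) := if x == 1 || x == 3 || x == 4 then (hv + 1, lk) else (hv, lk + 1)
      let (tr, hd) := if x ≥ 3 then (tr + 1, if x == 3 || x == 5 || x == 6 then hd + 1 else hd)
                      else (tr, hd)
      (hv, lk, tr, hd))
    (0, 0, 0, 0)
  (r.1, r.2.1 - 9, r.2.2.1, r.2.2.2)

-- ===== PORT B =====
-- Python's `freq[x] += 1` is exact here as `set x.toNat`: every tallied x is `_ & 15`, hence in [0,16).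
def score_familiars_alt (state : List (String × List Int)) : Int × Int × Int × Int :=
  let familiars := ((PySem.Dict.mk state).get? "familiars").getD []
  let byts := ((PySem.Dict.mk state).get? "familiar-bytes").getD []
  let n : Int := familiars.length
  let nibs := (PySem.List.slice byts none (some (PySem.Int.floordiv n 2 + 1))).foldl
      (fun (acc : List Int) (b : Int) => acc ++ [PySem.Int.band (b >>> (4 : Nat)) 15, PySem.Int.band b 15]) ([] : List Int)
  let freq := (PySem.List.slice nibs (some 1) (some (n + 1))).foldl
      (fun (f : List Int) x => f.set x.toNat (f.getD x.toNat 0 + 1)) (List.replicate 16 0)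
  let haveC := freq.getD 1 0 + freq.getD 3 0 + freq.getD 4 0
  let tourC := ((PySem.List.pyRange 3 16 1).map (fun c => freq.getD c.toNat 0)).sum
  let hundredC := freq.getD 3 0 + freq.getD 5 0 + freq.getD 6 0
  (haveC, n - haveC - 9, tourC, hundredC)

-- ===== PRECONDITION & SPEC =====
-- Pre_ excludes exactly the inputs where A raises: a missing 'familiars' or 'familiar-bytes' key
-- (KeyError), or a familiar list long enough that getbits indexes past the end of the byte list
-- (IndexError at byte index len(familiars) // 2).
def Pre_score_familiars (state : List (String × List Int)) : Prop :=
  ((PySem.Dict.mk state).get? "familiars").isSome ∧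
  ((PySem.Dict.mk state).get? "familiar-bytes").isSome ∧
  (let fams := ((PySem.Dict.mk state).get? "familiars").getD []
   let byts := ((PySem.Dict.mk state).get? "familiar-bytes").getD []
   fams.length = 0 ∨ fams.length / 2 < byts.length)

instance (state : List (String × List Int)) : Decidable (Pre_score_familiars state) := by
  unfold Pre_score_familiars; infer_instance

def pvWitness_score_familiars : (List (String × List Int)) :=
  [("familiars", [7, 8, 9]), ("familiar-bytes", [0, 52, 96])]

def Spec_score_familiars (state : List (String × List Int)) (out : Int × Int × Int × Int) : Prop := out = score_familiars_alt state
instance (state : List (String × List Int)) (out : Int × Int × Int × Int) : Decidable (Spec_score_familiars state out) := by unfold Spec_score_familiars; infer_instance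

-- ===== CLAIM (what is proved, stated in full; the proofs are below) =====
def Claim_equal_score_familiars : Prop := ∀ (state : List (String × List Int)), Dom_score_familiars state → Pre_score_familiars state → Spec_score_familiars state (score_familiars state)

-- ===== LEMMAS AND PROOFS =====

-- B's direct nibble formula: the (1-based) j-th 4-bit code
def nib (byts : List Int) (j : Int) : Int :=
  PySem.Int.band
    ((PySem.List.pyGet? byts (PySem.Int.floordiv j 2)).getD 0 >>> (4 * (1 - PySem.Int.mod j 2)).toNat)
    15

-- the common code list both ports are reduced to
def codesL (byts : List Int) (N : Nat) : List Int :=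
  (PySem.List.pyRange 1 ((N : Int) + 1) 1).map (fun i => nib byts i)

-- getbits with element size 4 picks the (1-based) j-th nibble
theorem getbits_eq_nibble (byts : List Int) (j : Int) :
    getbits byts j 4 = nib byts j := by
  unfold getbits nib
  simp only [PySem.Int.mod_eq_emod_of_pos (a := j * 4) (by norm_num : (0:Int) < 8),
             PySem.Int.mod_eq_emod_of_pos (a := j) (by norm_num : (0:Int) < 2),
             PySem.Int.floordiv_eq_ediv_of_pos (a := j) (by norm_num : (0:Int) < 2),
             Int.shiftRight_eq_div_pow]
  have hnb : ¬ ((j * 4) % 8 + 4 > 8) := by omega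
  rw [if_neg hnb]
  norm_num
  have h1 : j * 4 / (8 : Int) = j / 2 := by omega
  have h2 : (8 - (j * 4) % 8 - 4).toNat = (4 * (1 - j % 2)).toNat := by omega
  rw [h1, h2]
  congr 1

-- A's fused loop over a list of codes computes four predicate counts shifted by the accumulator
theorem foldA_counts (cs : List Int) (hv lk tr hd : Int) :
    cs.foldl
      (fun (acc : Int × Int × Int × Int) (x : Int) =>
        let hv := acc.1
        let lk := acc.2.1
        let tr := acc.2.2.1
        let hd := acc.2.2.2
        let (hv, lk) := if x == 1 || x == 3 || x == 4 then (hv + 1, lk) else (hv, lk + 1)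
        let (tr, hd) := if x ≥ 3 then (tr + 1, if x == 3 || x == 5 || x == 6 then hd + 1 else hd)
                        else (tr, hd)
        (hv, lk, tr, hd))
      (hv, lk, tr, hd)
    = (hv + (cs.countP (fun x => x == 1 || x == 3 || x == 4) : Int),
       lk + (cs.countP (fun x => !(x == 1 || x == 3 || x == 4)) : Int),
       tr + (cs.countP (fun x => decide (x ≥ 3)) : Int),
       hd + (cs.countP (fun x => x == 3 || x == 5 || x == 6) : Int)) := by
  induction cs generalizing hv lk tr hd with
  | nil => simp
  | cons c cs ih =>
    have h36 : (c == 3 || c == 5 || c == 6) = true → c ≥ 3 := by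
      intro h; simp only [Bool.or_eq_true, beq_iff_eq] at h; omega
    simp only [List.foldl_cons]
    by_cases h1 : (c == 1 || c == 3 || c == 4) = true <;>
      by_cases h2 : c ≥ 3 <;>
        by_cases h3 : (c == 3 || c == 5 || c == 6) = true <;>
          (first
            | exact absurd (h36 h3) h2
            | (simp only [h1, h2, h3, if_true, if_false, ih, List.countP_cons,
                 decide_true, decide_false, Bool.not_true, Bool.not_false,
                 Bool.false_eq_true];
               simp only [Prod.ext_iff];
               push_cast;
               exact ⟨by omega, by omega, by omega, by omega⟩))

-- the two index ranges produce the same code list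
theorem codes_eq (byts : List Int) (n : Nat) :
    (PySem.List.pyRange 0 (n : Int) 1).map (fun i => getbits byts (i + 1) 4) = codesL byts n := by
  unfold codesL
  rw [PySem.List.pyRange_one, PySem.List.pyRange_one]
  simp only [Int.sub_zero, Int.add_sub_cancel, Int.toNat_natCast, List.map_map]
  refine List.map_congr_left (fun k hk => ?_)
  simp only [Function.comp]
  rw [getbits_eq_nibble byts (0 + (k : Int) + 1)]
  norm_num [Int.add_comm]

-- counting the complement predicate counts the rest of the list
theorem countP_not_eq (p : Int → Bool) (l : List Int) :
    l.countP (fun a => !p a) = l.length - l.countP p := by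
  induction l with
  | nil => simp
  | cons a l ih =>
    have := l.countP_le_length (p := p)
    by_cases h : p a
    · simp [h, ih]
    · simp [h, ih]; omega

-- A's body reduced to the four counts over the common code list
theorem A_body_eq (fams byts : List Int) :
    (let r := (PySem.List.pyRange 0 (fams.length : Int) 1).foldl
      (fun (acc : Int × Int × Int × Int) i =>
        let x := getbits byts (i + 1) 4
        let hv := acc.1
        let lk := acc.2.1
        let tr := acc.2.2.1
        let hd := acc.2.2.2
        let (hv, lk) := if x == 1 || x == 3 || x == 4 then (hv + 1, lk) else (hv, lk + 1)
        let (tr, hd) := if x ≥ 3 then (tr + 1, if x == 3 || x == 5 || x == 6 then hd + 1 else hd)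
                        else (tr, hd)
        (hv, lk, tr, hd))
      (0, 0, 0, 0)
     (r.1, r.2.1 - 9, r.2.2.1, r.2.2.2))
    =
    (let codes := codesL byts fams.length
     let haveC : Int := codes.countP (fun x => x == 1 || x == 3 || x == 4)
     (haveC, (fams.length : Int) - haveC - 9,
      (codes.countP (fun x => decide (x ≥ 3)) : Int),
      (codes.countP (fun x => x == 3 || x == 5 || x == 6) : Int))) := by
  have hstep : (fun (acc : Int × Int × Int × Int) (i : Int) =>
        let x := getbits byts (i + 1) 4
        let hv := acc.1
        let lk := acc.2.1
        let tr := acc.2.2.1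
        let hd := acc.2.2.2
        let (hv, lk) := if x == 1 || x == 3 || x == 4 then (hv + 1, lk) else (hv, lk + 1)
        let (tr, hd) := if x ≥ 3 then (tr + 1, if x == 3 || x == 5 || x == 6 then hd + 1 else hd)
                        else (tr, hd)
        (hv, lk, tr, hd))
      = (fun (acc : Int × Int × Int × Int) (i : Int) =>
          (fun (acc : Int × Int × Int × Int) (x : Int) =>
            let hv := acc.1
            let lk := acc.2.1
            let tr := acc.2.2.1
            let hd := acc.2.2.2
            let (hv, lk) := if x == 1 || x == 3 || x == 4 then (hv + 1, lk) else (hv, lk + 1)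
            let (tr, hd) := if x ≥ 3 then (tr + 1, if x == 3 || x == 5 || x == 6 then hd + 1 else hd)
                            else (tr, hd)
            (hv, lk, tr, hd)) acc (getbits byts (i + 1) 4)) := rfl
  rw [hstep]
  have hfm := (List.foldl_map (f := fun i : Int => getbits byts (i + 1) 4)
      (g := fun (acc : Int × Int × Int × Int) (x : Int) =>
            let hv := acc.1
            let lk := acc.2.1
            let tr := acc.2.2.1
            let hd := acc.2.2.2
            let (hv, lk) := if x == 1 || x == 3 || x == 4 then (hv + 1, lk) else (hv, lk + 1)
            let (tr, hd) := if x ≥ 3 then (tr + 1, if x == 3 || x == 5 || x == 6 then hd + 1 else hd)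
                            else (tr, hd)
            (hv, lk, tr, hd))
      (l := PySem.List.pyRange 0 (fams.length : Int) 1) (init := ((0:Int), (0:Int), (0:Int), (0:Int)))).symm
  rw [hfm, codes_eq byts fams.length, foldA_counts]
  have hlen : (codesL byts fams.length).length = fams.length := by
    unfold codesL
    rw [List.length_map, PySem.List.length_pyRange_one]; omega
  have hcomp := countP_not_eq (fun x => x == 1 || x == 3 || x == 4) (codesL byts fams.length)
  have hle := List.countP_le_length (p := fun x => x == 1 || x == 3 || x == 4)
      (l := codesL byts fams.length)
  simp only [Prod.ext_iff]
  refine ⟨by ring, ?_, by norm_num, by norm_num⟩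
  rw [hcomp]
  rw [hlen] at hcomp hle ⊢
  push_cast [Nat.cast_sub (by omega : List.countP _ _ ≤ fams.length)]
  ring

-- every value of the form a & 15 lies in [0, 16)
theorem band15_bounds (a : Int) : 0 ≤ PySem.Int.band a 15 ∧ PySem.Int.band a 15 < 16 := by
  simp only [PySem.Int.band]
  have h15 : (15 : Int).toNat = 15 := rfl
  rw [h15]
  norm_num
  split_ifs with h
  · have h1 : a.toNat &&& 15 ≤ 15 := Nat.and_le_right
    omega
  · have h1 : 15 &&& (-a - 1).toNat ≤ 15 := Nat.and_le_left
    omega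

-- indexing into the two-nibbles-per-byte stream
theorem flatPairs_getD (f g : Int → Int) (xs : List Int) (j : Nat) (hj : j < 2 * xs.length) :
    (xs.flatMap (fun b => [f b, g b])).getD j 0
      = (if j % 2 = 0 then f (xs.getD (j / 2) 0) else g (xs.getD (j / 2) 0)) := by
  induction xs generalizing j with
  | nil => simp at hj
  | cons b xs ih =>
    match j with
    | 0 => simp
    | 1 => simp
    | (k+2) =>
      have hj' : k < 2 * xs.length := by simp at hj; omega
      simp only [List.flatMap_cons, List.cons_append, List.nil_append, List.getD_cons_succ]
      rw [ih k hj']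
      have h2 : (k+2) % 2 = k % 2 := by omega
      have h3 : (k+2) / 2 = k/2 + 1 := by omega
      rw [h2, h3, List.getD_cons_succ]

theorem flatPairs_length (f g : Int → Int) (xs : List Int) :
    (xs.flatMap (fun b => [f b, g b])).length = 2 * xs.length := by
  induction xs with
  | nil => simp
  | cons b xs ih => simp [ih]; omega

-- the j-th entry of the code list, as B's per-byte hi/lo split sees it
theorem nib_at (byts : List Int) (k : Nat) :
    nib byts (1 + (k : Int))
      = (if (k+1) % 2 = 0 then PySem.Int.band ((byts.getD ((k+1)/2) 0) >>> (4 : Nat)) 15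
         else PySem.Int.band (byts.getD ((k+1)/2) 0) 15) := by
  unfold nib
  have hcast : (1 + (k : Int)) = (((k + 1 : Nat) : Int)) := by push_cast; ring
  rw [hcast]
  rw [show PySem.Int.floordiv ((k + 1 : Nat) : Int) 2 = (((k+1)/2 : Nat) : Int) by
        exact_mod_cast PySem.Int.floordiv_natCast (k+1) 2,
      show PySem.Int.mod ((k + 1 : Nat) : Int) 2 = (((k+1) % 2 : Nat) : Int) by
        exact_mod_cast PySem.Int.mod_natCast (k+1) 2]
  rw [PySem.List.pyGet?_natCast]
  rcases Nat.even_or_odd (k+1) with he | ho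
  · have h0 : (k+1) % 2 = 0 := Nat.even_iff.mp he
    rw [h0]
    norm_num
    rfl
  · have h1 : (k+1) % 2 = 1 := Nat.odd_iff.mp ho
    rw [h1]
    norm_num

-- the sliced nibble stream IS the code list
theorem nibs_eq_codes (byts : List Int) (N : Nat) (h : N = 0 ∨ N / 2 < byts.length) :
    (((byts.take (N / 2 + 1)).flatMap
        (fun (b : Int) => [PySem.Int.band (b >>> (4 : Nat)) 15, PySem.Int.band b 15])).drop 1).take N
      = codesL byts N := by
  rcases h with h0 | hlt
  · subst h0; simp [codesL]
  · have htake : (byts.take (N / 2 + 1)).length = N / 2 + 1 := by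
      simp; omega
    have hL := flatPairs_length (fun b => PySem.Int.band (b >>> (4 : Nat)) 15)
        (fun b => PySem.Int.band b 15) (byts.take (N / 2 + 1))
    rw [htake] at hL
    have hcod : codesL byts N = (List.range N).map (fun (k : Nat) => nib byts (1 + (k : Int))) := by
      unfold codesL
      rw [PySem.List.pyRange_one]
      simp only [Int.add_sub_cancel, List.map_map]
      refine List.map_congr_left fun k hk => ?_
      simp [Function.comp]
    rw [hcod]
    apply List.ext_getElem
    · simp [hL]; omega
    · intro k hk1 hk2
      simp only [List.length_take, List.length_drop, hL] at hk1
      have hkN : k < N := by simp at hk2; omega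
      rw [List.getElem_take, List.getElem_drop, List.getElem_map, List.getElem_range]
      rw [nib_at]
      have hget : ((byts.take (N / 2 + 1)).flatMap
          (fun (b : Int) => [PySem.Int.band (b >>> (4 : Nat)) 15, PySem.Int.band b 15]))[1 + k]'(by omega)
          = ((byts.take (N / 2 + 1)).flatMap
          (fun (b : Int) => [PySem.Int.band (b >>> (4 : Nat)) 15, PySem.Int.band b 15])).getD (1 + k) 0 := by
        rw [List.getD_eq_getElem _ _ (by omega)]
      rw [hget, flatPairs_getD _ _ _ _ (by omega)]
      have hidx : (1 + k) / 2 < N / 2 + 1 := by omega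
      have hbyt : (byts.take (N / 2 + 1)).getD ((1 + k) / 2) 0 = byts.getD ((1 + k) / 2) 0 := by
        rw [List.getD_eq_getElem _ _ (by omega), List.getElem_take,
            List.getD_eq_getElem _ _ (by omega)]
      rw [hbyt]
      have hmod : (1 + k) % 2 = (k + 1) % 2 := by omega
      have hdiv : (1 + k) / 2 = (k + 1) / 2 := by omega
      rw [hmod, hdiv]

-- histogram invariant: after the tally fold, entry c holds count of c (plus the initial entry)
theorem hist_fold (l : List Int) (f : List Int) (hf : f.length = 16)
    (hb : ∀ x ∈ l, 0 ≤ x ∧ x < 16) :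
    (l.foldl (fun f x => f.set x.toNat (f.getD x.toNat 0 + 1)) f).length = 16 ∧
    ∀ c : Nat, c < 16 →
      (l.foldl (fun f x => f.set x.toNat (f.getD x.toNat 0 + 1)) f).getD c 0
        = f.getD c 0 + (l.countP (fun x => x == (c : Int)) : Int) := by
  induction l generalizing f with
  | nil => exact ⟨hf, fun c hc => by simp⟩
  | cons a l ih =>
    obtain ⟨ha0, ha16⟩ := hb a (List.mem_cons_self)
    have hb' : ∀ x ∈ l, 0 ≤ x ∧ x < 16 := fun x hx => hb x (List.mem_cons_of_mem _ hx)
    have hlen : (f.set a.toNat (f.getD a.toNat 0 + 1)).length = 16 := by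
      simp [hf]
    obtain ⟨H1, H2⟩ := ih (f.set a.toNat (f.getD a.toNat 0 + 1)) hlen hb'
    refine ⟨by simpa using H1, ?_⟩
    intro c hc
    simp only [List.foldl_cons]
    rw [H2 c hc, List.countP_cons]
    by_cases hac : a.toNat = c
    · have haeq : (a == (c : Int)) = true := by
        simp only [beq_iff_eq]; omega
      rw [haeq]
      have : (f.set a.toNat (f.getD a.toNat 0 + 1)).getD c 0 = f.getD c 0 + 1 := by
        subst hac
        rw [List.getD_eq_getElem?_getD, List.getElem?_set_self (by omega)]
        rfl
      rw [this]; push_cast; simp; omega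
    · have haeq : (a == (c : Int)) = false := by
        simp only [beq_eq_false_iff_ne]; omega
      rw [haeq]
      have : (f.set a.toNat (f.getD a.toNat 0 + 1)).getD c 0 = f.getD c 0 := by
        rw [List.getD_eq_getElem?_getD, List.getElem?_set_ne (by omega), List.getD_eq_getElem?_getD]
      rw [this]; simp

-- sum of the three relevant table entries is the 'have' predicate count
theorem count3_eq (c1 c2 c3 : Int) (h12 : c1 ≠ c2) (h13 : c1 ≠ c3) (h23 : c2 ≠ c3) (l : List Int) :
    (l.countP (fun x => x == c1) : Int) + l.countP (fun x => x == c2) + l.countP (fun x => x == c3)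
      = l.countP (fun x => x == c1 || x == c2 || x == c3) := by
  induction l with
  | nil => simp
  | cons a l ih =>
    simp only [List.countP_cons]
    by_cases e1 : a = c1 <;> by_cases e2 : a = c2 <;> by_cases e3 : a = c3 <;>
      simp_all <;> omega

-- sum of table entries 3..15 is the 'tour' predicate count (all values lie in [0,16))
theorem tour_sum_eq (l : List Int) (hb : ∀ x ∈ l, 0 ≤ x ∧ x < 16) :
    ((PySem.List.pyRange 3 16 1).map (fun c => (l.countP (fun x => x == c) : Int))).sum
      = l.countP (fun x => decide (x ≥ 3)) := by
  induction l with
  | nil => simp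
  | cons a l ih =>
    obtain ⟨ha0, ha16⟩ := hb a (List.mem_cons_self)
    have hb' : ∀ x ∈ l, 0 ≤ x ∧ x < 16 := fun x hx => hb x (List.mem_cons_of_mem _ hx)
    simp only [List.countP_cons]
    have hsum : ((PySem.List.pyRange 3 16 1).map (fun c => (l.countP (fun x => x == c) : Int)
          + (if (a == c) = true then 1 else 0))).sum
        = ((PySem.List.pyRange 3 16 1).map (fun c => (l.countP (fun x => x == c) : Int))).sum
          + ((PySem.List.pyRange 3 16 1).map (fun c => (if (a == c) = true then (1:Int) else 0))).sum := by
      exact PySem.List.sum_map_add_int _ _ _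
    have hone : ((PySem.List.pyRange 3 16 1).map (fun c => (if (a == c) = true then (1:Int) else 0))).sum
        = if decide (a ≥ 3) = true then 1 else 0 := by
      interval_cases a <;> decide
    calc ((PySem.List.pyRange 3 16 1).map (fun c => ((l.countP (fun x => x == c)
            + if (a == c) = true then 1 else 0 : Nat) : Int))).sum
        = ((PySem.List.pyRange 3 16 1).map (fun c => (l.countP (fun x => x == c) : Int)
            + (if (a == c) = true then 1 else 0))).sum := by
          refine congrArg _ (List.map_congr_left fun c hc => ?_)
          push_cast; split <;> simp
      _ = _ := by
          rw [hsum, ih hb', hone]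
          push_cast
          split <;> simp

-- B's body reduced to the same four counts over the common code list
theorem B_body_eq (fams byts : List Int) (h : fams.length = 0 ∨ fams.length / 2 < byts.length) :
    (let n : Int := fams.length
     let nibs := (PySem.List.slice byts none (some (PySem.Int.floordiv n 2 + 1))).foldl
        (fun (acc : List Int) (b : Int) => acc ++ [PySem.Int.band (b >>> (4 : Nat)) 15, PySem.Int.band b 15]) ([] : List Int)
     let freq := (PySem.List.slice nibs (some 1) (some (n + 1))).foldl
        (fun (f : List Int) x => f.set x.toNat (f.getD x.toNat 0 + 1)) (List.replicate 16 0)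
     let haveC := freq.getD 1 0 + freq.getD 3 0 + freq.getD 4 0
     let tourC := ((PySem.List.pyRange 3 16 1).map (fun c => freq.getD c.toNat 0)).sum
     let hundredC := freq.getD 3 0 + freq.getD 5 0 + freq.getD 6 0
     ((haveC : Int), n - haveC - 9, tourC, hundredC))
    =
    (let codes := codesL byts fams.length
     let haveC : Int := codes.countP (fun x => x == 1 || x == 3 || x == 4)
     (haveC, (fams.length : Int) - haveC - 9,
      (codes.countP (fun x => decide (x ≥ 3)) : Int),
      (codes.countP (fun x => x == 3 || x == 5 || x == 6) : Int))) := by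
  have hN2 : PySem.Int.floordiv ((fams.length : Nat) : Int) 2 + 1
      = ((fams.length / 2 + 1 : Nat) : Int) := by
    rw [show PySem.Int.floordiv ((fams.length : Nat) : Int) 2 = ((fams.length / 2 : Nat) : Int) from
          by exact_mod_cast PySem.Int.floordiv_natCast fams.length 2]
    push_cast; ring
  simp only []
  rw [hN2, PySem.List.slice_to_natCast, PySem.List.foldl_append_eq_flatMap, List.nil_append]
  rw [PySem.List.slice_toNat _ (by omega) (by omega)]
  have ht1 : ((1 : Int)).toNat = 1 := rfl
  have ht2 : (((fams.length : Int)) + 1).toNat = fams.length + 1 := by omega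
  rw [ht1, ht2, Nat.add_sub_cancel]
  rw [nibs_eq_codes byts fams.length h]
  have hb : ∀ x ∈ codesL byts fams.length, 0 ≤ x ∧ x < 16 := by
    intro x hx
    unfold codesL at hx
    obtain ⟨i, hi, rfl⟩ := List.mem_map.mp hx
    exact band15_bounds _
  obtain ⟨Hlen, H2⟩ := hist_fold (codesL byts fams.length) (List.replicate 16 0) (by simp) hb
  have Hfreq : ∀ c : Nat, c < 16 →
      ((codesL byts fams.length).foldl
          (fun (f : List Int) x => f.set x.toNat (f.getD x.toNat 0 + 1))
          (List.replicate 16 0)).getD c 0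
        = ((codesL byts fams.length).countP (fun x => x == (c : Int)) : Int) := by
    intro c hc
    rw [H2 c hc]
    have hz : (List.replicate 16 (0 : Int)).getD c 0 = 0 := by
      rw [List.getD_eq_getElem?_getD, List.getElem?_replicate]
      simp [hc]
    rw [hz, zero_add]
  have g1 : ((codesL byts fams.length).foldl
          (fun (f : List Int) x => f.set x.toNat (f.getD x.toNat 0 + 1))
          (List.replicate 16 0)).getD 1 0
        + ((codesL byts fams.length).foldl
          (fun (f : List Int) x => f.set x.toNat (f.getD x.toNat 0 + 1))
          (List.replicate 16 0)).getD 3 0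
        + ((codesL byts fams.length).foldl
          (fun (f : List Int) x => f.set x.toNat (f.getD x.toNat 0 + 1))
          (List.replicate 16 0)).getD 4 0
      = ((codesL byts fams.length).countP (fun x => x == 1 || x == 3 || x == 4) : Int) := by
    rw [Hfreq 1 (by omega), Hfreq 3 (by omega), Hfreq 4 (by omega)]
    rw [← count3_eq 1 3 4 (by norm_num) (by norm_num) (by norm_num)]
    norm_num
  have g4 : ((codesL byts fams.length).foldl
          (fun (f : List Int) x => f.set x.toNat (f.getD x.toNat 0 + 1))
          (List.replicate 16 0)).getD 3 0
        + ((codesL byts fams.length).foldl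
          (fun (f : List Int) x => f.set x.toNat (f.getD x.toNat 0 + 1))
          (List.replicate 16 0)).getD 5 0
        + ((codesL byts fams.length).foldl
          (fun (f : List Int) x => f.set x.toNat (f.getD x.toNat 0 + 1))
          (List.replicate 16 0)).getD 6 0
      = ((codesL byts fams.length).countP (fun x => x == 3 || x == 5 || x == 6) : Int) := by
    rw [Hfreq 3 (by omega), Hfreq 5 (by omega), Hfreq 6 (by omega)]
    rw [← count3_eq 3 5 6 (by norm_num) (by norm_num) (by norm_num)]
    norm_num
  have g3 : ((PySem.List.pyRange 3 16 1).map (fun c =>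
        ((codesL byts fams.length).foldl
          (fun (f : List Int) x => f.set x.toNat (f.getD x.toNat 0 + 1))
          (List.replicate 16 0)).getD c.toNat 0)).sum
      = ((codesL byts fams.length).countP (fun x => decide (x ≥ 3)) : Int) := by
    rw [List.map_congr_left (fun c hc => ?_), tour_sum_eq (codesL byts fams.length) hb]
    have hcb := PySem.List.mem_pyRange_one.mp hc
    rw [Hfreq c.toNat (by omega)]
    rw [Int.toNat_of_nonneg (by omega)]
  simp only [Prod.ext_iff]
  exact ⟨g1, by rw [g1], g3, g4⟩

-- ===== VERDICT (by name: the statement is the Claim_ definition above) =====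
theorem score_familiars_spec : Claim_equal_score_familiars := by
  intro state _ hpre
  obtain ⟨-, -, hlen⟩ := hpre
  unfold Spec_score_familiars score_familiars score_familiars_alt
  rw [A_body_eq, B_body_eq _ _ hlen]
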